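-- pv_equiv track=rewrite | github.com/Codog808/Challenges | AdventOfCode/2015/python/d15/main.py | calculate_score_p2
-- ===== SOURCE A (Python) =====
-- def calculate_score_p2(teaspoons, cookies):
--     properties = {}
--     for property in ['capacity', 'durability', 'flavor', 'texture']:
--         property_score = 0
--         calories = 0
--         for i, cookie_name in enumerate(cookies):
--             cookie_values = cookies[cookie_name]
--             value = cookie_values[property]
--             property_score += value * teaspoons[i]
--             calories += cookie_values['calories'] * teaspoons[i]
--         properties[property] = max(property_score, 0)
--         if calories != 500:
--             return 0
--
--     score = 1
--     for property in properties:
--         score *= properties[property]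
--     return score
-- ===== SOURCE B (Python) =====
-- def calculate_score_p2(teaspoons, cookies):
--     cap = dur = fla = tex = cal = 0
--     for i, name in enumerate(cookies):
--         v = cookies[name]
--         t = teaspoons[i]
--         cap += v['capacity'] * t
--         dur += v['durability'] * t
--         fla += v['flavor'] * t
--         tex += v['texture'] * t
--         cal += v['calories'] * t
--     if cal != 500:
--         return 0
--     return max(cap, 0) * max(dur, 0) * max(fla, 0) * max(tex, 0)
-- ===== Notes on version B (the rewrite author's own statement) =====
-- stated objective: simpler
-- what changed: One single pass over the cookies maintaining all four property sums and the calorie sum together, with the calorie check and max-clamped product after the loop, instead of A's four property-outer passes each re-summing calories and building a properties dict that is then multiplied out.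
-- outside the precondition, e.g. on calculate_score_p2([1], {'x': {'capacity': 2, 'calories': 5}}): A returns 0, B raises KeyError
import Mathlib
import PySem

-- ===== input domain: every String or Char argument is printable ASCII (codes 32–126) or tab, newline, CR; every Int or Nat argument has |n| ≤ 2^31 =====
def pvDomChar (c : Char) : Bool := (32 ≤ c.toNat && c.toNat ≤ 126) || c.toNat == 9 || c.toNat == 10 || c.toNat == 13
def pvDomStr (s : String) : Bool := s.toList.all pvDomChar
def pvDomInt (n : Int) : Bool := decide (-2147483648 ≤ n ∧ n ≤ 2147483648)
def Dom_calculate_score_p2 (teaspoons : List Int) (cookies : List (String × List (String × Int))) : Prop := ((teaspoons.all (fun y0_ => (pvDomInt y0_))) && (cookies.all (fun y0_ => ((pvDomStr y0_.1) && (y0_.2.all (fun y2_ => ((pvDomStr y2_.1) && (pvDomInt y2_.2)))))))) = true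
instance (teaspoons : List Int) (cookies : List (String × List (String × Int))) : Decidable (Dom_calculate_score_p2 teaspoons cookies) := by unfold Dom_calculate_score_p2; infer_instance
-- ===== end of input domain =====

-- B replaces A's four property-outer/cookie-inner passes (each re-summing calories and
-- filling a properties dict) by one single cookie-outer pass maintaining all five running
-- sums, then one calorie check and the max-clamped product.

-- ===== PORT A =====
-- one inner-loop step: cookie_values = cookies[cookie_name]; value = cookie_values[property];
-- property_score += value * teaspoons[i]; calories += cookie_values['calories'] * teaspoons[i]
-- (each raising lookup is an Option; none = the Python exception)
def pvAStep (teaspoons : List Int) (cookies : List (String × List (String × Int)))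
    (prop : String) (acc : Option (Int × Int)) (e : Int × (String × List (String × Int))) :
    Option (Int × Int) :=
  match acc with
  | none => none
  | some (ps, cal) =>
    match (PySem.Dict.mk cookies).get? e.2.1 with
    | none => none
    | some cv =>
      match (PySem.Dict.mk cv).get? prop with
      | none => none
      | some v =>
        match PySem.List.pyGet? teaspoons e.1 with
        | none => none
        | some t =>
          match (PySem.Dict.mk cv).get? "calories" with
          | none => none
          | some c => some (ps + v * t, cal + c * t)

-- the inner 'for i, cookie_name in enumerate(cookies)' loop for one property
def pvAInner (teaspoons : List Int) (cookies : List (String × List (String × Int)))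
    (prop : String) : Option (Int × Int) :=
  (PySem.List.enumerate cookies).foldl (pvAStep teaspoons cookies prop) (some (0, 0))

-- the outer 'for property in [...]' loop with its early 'return 0' and the final score loop
def pvAOuter (teaspoons : List Int) (cookies : List (String × List (String × Int)))
    (props : PySem.Dict String Int) : List String → Option Int
  | [] => some (props.keys.foldl (fun s k => s * props.getD k 0) 1)
  | p :: rest =>
    match pvAInner teaspoons cookies p with
    | none => none
    | some (ps, cal) =>
      let props' := props.insert p (max ps 0)
      if cal ≠ 500 then some 0 else pvAOuter teaspoons cookies props' rest

def calculate_score_p2 (teaspoons : List Int) (cookies : List (String × List (String × Int))) : Int :=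
  (pvAOuter teaspoons cookies PySem.Dict.empty
    ["capacity", "durability", "flavor", "texture"]).getD 0

-- ===== PORT B =====
-- one step of B's single pass: all five accumulators updated together
def pvBStep (teaspoons : List Int) (cookies : List (String × List (String × Int)))
    (acc : Option (Int × Int × Int × Int × Int)) (e : Int × (String × List (String × Int))) :
    Option (Int × Int × Int × Int × Int) :=
  match acc with
  | none => none
  | some (cap, dur, fla, tex, cal) =>
    match (PySem.Dict.mk cookies).get? e.2.1 with
    | none => none
    | some v =>
      match PySem.List.pyGet? teaspoons e.1 with
      | none => none
      | some t =>
        match (PySem.Dict.mk v).get? "capacity" with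
        | none => none
        | some vc =>
          match (PySem.Dict.mk v).get? "durability" with
          | none => none
          | some vd =>
            match (PySem.Dict.mk v).get? "flavor" with
            | none => none
            | some vf =>
              match (PySem.Dict.mk v).get? "texture" with
              | none => none
              | some vt =>
                match (PySem.Dict.mk v).get? "calories" with
                | none => none
                | some vl =>
                  some (cap + vc * t, dur + vd * t, fla + vf * t, tex + vt * t, cal + vl * t)

def calculate_score_p2_alt (teaspoons : List Int) (cookies : List (String × List (String × Int))) : Int :=
  match (PySem.List.enumerate cookies).foldl (pvBStep teaspoons cookies) (some (0, 0, 0, 0, 0)) with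
  | none => 0
  | some (cap, dur, fla, tex, cal) =>
    if cal ≠ 500 then 0 else max cap 0 * max dur 0 * max fla 0 * max tex 0

-- ===== PRECONDITION & SPEC =====
-- Pre_ excludes: (a) inputs where A raises (teaspoons shorter than cookies, or a cookie
-- missing the 'capacity' or 'calories' key); (b) cookie dicts with duplicate keys
-- (outer names or inner property keys), which a real Python dict cannot carry; and
-- (c) cookies missing one of the later property keys — there A may still return 0 via its
-- early calorie return while B's single pass naturally raises KeyError (see cites).
def Pre_calculate_score_p2 (teaspoons : List Int) (cookies : List (String × List (String × Int))) : Prop :=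
  cookies.length ≤ teaspoons.length ∧
  (cookies.map Prod.fst).Nodup ∧
  ∀ p ∈ cookies, (p.2.map Prod.fst).Nodup ∧
    ∀ k ∈ (["capacity", "durability", "flavor", "texture", "calories"] : List String),
      ((PySem.Dict.mk p.2).get? k).isSome
instance (teaspoons : List Int) (cookies : List (String × List (String × Int))) : Decidable (Pre_calculate_score_p2 teaspoons cookies) := by unfold Pre_calculate_score_p2; infer_instance

def pvWitness_calculate_score_p2 : List Int × (List (String × List (String × Int))) :=
  ([100], [("a", [("capacity", 2), ("durability", 1), ("flavor", 1), ("texture", 1), ("calories", 5)])])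

def Spec_calculate_score_p2 (teaspoons : List Int) (cookies : List (String × List (String × Int))) (out : Int) : Prop := out = calculate_score_p2_alt teaspoons cookies
instance (teaspoons : List Int) (cookies : List (String × List (String × Int))) (out : Int) : Decidable (Spec_calculate_score_p2 teaspoons cookies out) := by unfold Spec_calculate_score_p2; infer_instance

-- ===== CLAIM (what is proved, stated in full; the proofs are below) =====
def Claim_equal_calculate_score_p2 : Prop := ∀ (teaspoons : List Int) (cookies : List (String × List (String × Int))), Dom_calculate_score_p2 teaspoons cookies → Pre_calculate_score_p2 teaspoons cookies → Spec_calculate_score_p2 teaspoons cookies (calculate_score_p2 teaspoons cookies)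

-- ===== LEMMAS AND PROOFS =====

-- every lookup one loop step performs succeeds at e
def pvOk (teaspoons : List Int) (cookies : List (String × List (String × Int)))
    (e : Int × (String × List (String × Int))) : Prop :=
  (∃ t, PySem.List.pyGet? teaspoons e.1 = some t) ∧
  ∃ cv, (PySem.Dict.mk cookies).get? e.2.1 = some cv ∧
    ∀ k ∈ (["capacity", "durability", "flavor", "texture", "calories"] : List String),
      ∃ v, (PySem.Dict.mk cv).get? k = some v

-- the resolved contribution of e for key k (defaults never used under pvOk)
def pvVal (teaspoons : List Int) (cookies : List (String × List (String × Int)))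
    (k : String) (e : Int × (String × List (String × Int))) : Int :=
  ((PySem.Dict.mk (((PySem.Dict.mk cookies).get? e.2.1).getD [])).get? k).getD 0
    * (PySem.List.pyGet? teaspoons e.1).getD 0

def pvSum (teaspoons : List Int) (cookies : List (String × List (String × Int)))
    (k : String) (xs : List (Int × (String × List (String × Int)))) : Int :=
  (xs.map (pvVal teaspoons cookies k)).sum

theorem pvAInner_fold (teaspoons : List Int) (cookies : List (String × List (String × Int)))
    (prop : String)
    (hprop : prop ∈ (["capacity", "durability", "flavor", "texture", "calories"] : List String)) :
    ∀ xs, (∀ e ∈ xs, pvOk teaspoons cookies e) → ∀ a b,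
      xs.foldl (pvAStep teaspoons cookies prop) (some (a, b)) =
        some (a + pvSum teaspoons cookies prop xs, b + pvSum teaspoons cookies "calories" xs) := by
  intro xs
  induction xs with
  | nil => intro _ a b; simp [pvSum]
  | cons x xs ih =>
    intro h a b
    obtain ⟨⟨t, ht⟩, cv, hcv, hkeys⟩ := h x (List.mem_cons_self)
    obtain ⟨v, hv⟩ := hkeys prop hprop
    obtain ⟨c, hc⟩ := hkeys "calories" (by simp)
    have hstep : pvAStep teaspoons cookies prop (some (a, b)) x = some (a + v * t, b + c * t) := by
      simp [pvAStep, hcv, hv, ht, hc]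
    rw [List.foldl_cons, hstep, ih (fun e he => h e (List.mem_cons_of_mem _ he))]
    have hvp : pvVal teaspoons cookies prop x = v * t := by simp [pvVal, hcv, hv, ht]
    have hvc : pvVal teaspoons cookies "calories" x = c * t := by simp [pvVal, hcv, hc, ht]
    simp [pvSum, hvp, hvc]
    constructor <;> ring

theorem pvBStep_fold (teaspoons : List Int) (cookies : List (String × List (String × Int))) :
    ∀ xs, (∀ e ∈ xs, pvOk teaspoons cookies e) → ∀ a b c d f,
      xs.foldl (pvBStep teaspoons cookies) (some (a, b, c, d, f)) =
        some (a + pvSum teaspoons cookies "capacity" xs,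
              b + pvSum teaspoons cookies "durability" xs,
              c + pvSum teaspoons cookies "flavor" xs,
              d + pvSum teaspoons cookies "texture" xs,
              f + pvSum teaspoons cookies "calories" xs) := by
  intro xs
  induction xs with
  | nil => intro _ a b c d f; simp [pvSum]
  | cons x xs ih =>
    intro h a b c d f
    obtain ⟨⟨t, ht⟩, cv, hcv, hkeys⟩ := h x (List.mem_cons_self)
    obtain ⟨v1, h1⟩ := hkeys "capacity" (by simp)
    obtain ⟨v2, h2⟩ := hkeys "durability" (by simp)
    obtain ⟨v3, h3⟩ := hkeys "flavor" (by simp)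
    obtain ⟨v4, h4⟩ := hkeys "texture" (by simp)
    obtain ⟨v5, h5⟩ := hkeys "calories" (by simp)
    have hstep : pvBStep teaspoons cookies (some (a, b, c, d, f)) x =
        some (a + v1 * t, b + v2 * t, c + v3 * t, d + v4 * t, f + v5 * t) := by
      simp [pvBStep, hcv, ht, h1, h2, h3, h4, h5]
    rw [List.foldl_cons, hstep, ih (fun e he => h e (List.mem_cons_of_mem _ he))]
    have e1 : pvVal teaspoons cookies "capacity" x = v1 * t := by simp [pvVal, hcv, h1, ht]
    have e2 : pvVal teaspoons cookies "durability" x = v2 * t := by simp [pvVal, hcv, h2, ht]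
    have e3 : pvVal teaspoons cookies "flavor" x = v3 * t := by simp [pvVal, hcv, h3, ht]
    have e4 : pvVal teaspoons cookies "texture" x = v4 * t := by simp [pvVal, hcv, h4, ht]
    have e5 : pvVal teaspoons cookies "calories" x = v5 * t := by simp [pvVal, hcv, h5, ht]
    simp [pvSum, e1, e2, e3, e4, e5]
    refine ⟨by ring, by ring, by ring, by ring, by ring⟩

theorem pvOk_of_pre (teaspoons : List Int) (cookies : List (String × List (String × Int)))
    (hpre : Pre_calculate_score_p2 teaspoons cookies) :
    ∀ e ∈ PySem.List.enumerate cookies, pvOk teaspoons cookies e := by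
  obtain ⟨hlen, _, hkeys⟩ := hpre
  intro e he
  rw [PySem.List.mem_enumerate_iff] at he
  obtain ⟨k, hk, rfl⟩ := he
  constructor
  · exact ⟨teaspoons[k]'(by omega), by
      simp [PySem.List.pyGet?_ofNat teaspoons k (by omega : k < teaspoons.length)]⟩
  · have hmem : cookies[k].1 ∈ (PySem.Dict.mk cookies).keys := by
      simp [PySem.Dict.keys]
      exact ⟨cookies[k].2, by exact List.getElem_mem hk⟩
    have : (PySem.Dict.mk cookies).get? cookies[k].1 ≠ none := by
      rw [Ne, PySem.Dict.get?_eq_none_iff_not_mem_keys (PySem.Dict.mk cookies)]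
      simpa using hmem
    obtain ⟨cv, hcv⟩ := Option.ne_none_iff_exists'.mp this
    refine ⟨cv, hcv, ?_⟩
    have hitem : (cookies[k].1, cv) ∈ cookies := by
      simpa using PySem.Dict.mem_items_of_get?_eq_some (PySem.Dict.mk cookies) hcv
    intro key hkey
    have := (hkeys _ hitem).2 key hkey
    exact Option.isSome_iff_exists.mp this

theorem calculate_score_p2_spec : Claim_equal_calculate_score_p2 := by
  intro teaspoons cookies _ hpre
  unfold Spec_calculate_score_p2
  have hok := pvOk_of_pre teaspoons cookies hpre
  set S := fun k => pvSum teaspoons cookies k (PySem.List.enumerate cookies) with hS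
  have hA : ∀ p, p ∈ (["capacity", "durability", "flavor", "texture", "calories"] : List String) →
      pvAInner teaspoons cookies p = some (S p, S "calories") := by
    intro p hp
    unfold pvAInner
    rw [pvAInner_fold teaspoons cookies p hp _ hok]
    simp [hS]
  have hB : (PySem.List.enumerate cookies).foldl (pvBStep teaspoons cookies) (some (0, 0, 0, 0, 0)) =
      some (S "capacity", S "durability", S "flavor", S "texture", S "calories") := by
    rw [pvBStep_fold teaspoons cookies _ hok]
    simp [hS]
  unfold calculate_score_p2 calculate_score_p2_alt
  rw [hB]
  by_cases hcal : S "calories" = 500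
  · simp only [pvAOuter, hA "capacity" (by simp), hA "durability" (by simp),
      hA "flavor" (by simp), hA "texture" (by simp), hcal]
    norm_num
    simp [PySem.Dict.keys, PySem.Dict.insert, PySem.Dict.empty, PySem.Dict.contains,
      PySem.Dict.getD, PySem.Dict.get?, List.foldl]
  · simp only [pvAOuter, hA "capacity" (by simp)]
    norm_num [hcal]
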